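-- pv_equiv track=rewrite | github.com/jerbear472/WaveSight | SERVER/sentiment_server.py | categorize_by_cultural_context
-- ===== SOURCE A (Python) =====
-- def categorize_by_topic(topic):
--     """Categorize topic by cultural domain"""
--     topic_lower = topic.lower()
--
--     if any(term in topic_lower for term in ['ai', 'crypto', 'tech', 'digital', 'virtual']):
--         return 'Technology'
--     elif any(term in topic_lower for term in ['fashion', 'music', 'art', 'design', 'creative']):
--         return 'Creative'
--     elif any(term in topic_lower for term in ['health', 'fitness', 'wellness', 'mental', 'nutrition']):
--         return 'Lifestyle'
--     elif any(term in topic_lower for term in ['climate', 'environment', 'sustainability', 'green']):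
--         return 'Environmental'
--     elif any(term in topic_lower for term in ['work', 'career', 'business', 'productivity']):
--         return 'Professional'
--     elif any(term in topic_lower for term in ['travel', 'culture', 'social', 'community']):
--         return 'Social'
--     else:
--         return 'Cultural'
--
-- def categorize_by_cultural_context(topic, subreddit_distribution):
--     """Enhanced categorization based on subreddit context"""
--     tech_subs = ['technology', 'futurology', 'artificial', 'MachineLearning']
--     creative_subs = ['Art', 'Design', 'Music', 'WeAreTheMusicMakers', 'streetwear']
--     lifestyle_subs = ['fitness', 'wellness', 'meditation', 'nutrition']
--
--     tech_count = sum(subreddit_distribution.get(sub, 0) for sub in tech_subs)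
--     creative_count = sum(subreddit_distribution.get(sub, 0) for sub in creative_subs)
--     lifestyle_count = sum(subreddit_distribution.get(sub, 0) for sub in lifestyle_subs)
--
--     if tech_count > creative_count and tech_count > lifestyle_count:
--         return 'Technology'
--     elif creative_count > lifestyle_count:
--         return 'Creative'
--     elif lifestyle_count > 0:
--         return 'Lifestyle'
--     else:
--         return categorize_by_topic(topic)  # Fallback to keyword-based
-- ===== SOURCE B (Python) =====
-- def categorize_by_topic(topic):
--     """Categorize topic by cultural domain"""
--     topic_lower = topic.lower()
--
--     if any(term in topic_lower for term in ['ai', 'crypto', 'tech', 'digital', 'virtual']):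
--         return 'Technology'
--     elif any(term in topic_lower for term in ['fashion', 'music', 'art', 'design', 'creative']):
--         return 'Creative'
--     elif any(term in topic_lower for term in ['health', 'fitness', 'wellness', 'mental', 'nutrition']):
--         return 'Lifestyle'
--     elif any(term in topic_lower for term in ['climate', 'environment', 'sustainability', 'green']):
--         return 'Environmental'
--     elif any(term in topic_lower for term in ['work', 'career', 'business', 'productivity']):
--         return 'Professional'
--     elif any(term in topic_lower for term in ['travel', 'culture', 'social', 'community']):
--         return 'Social'
--     else:
--         return 'Cultural'
--
-- _CATEGORY_INDEX = {
--     'technology': 'T', 'futurology': 'T', 'artificial': 'T', 'MachineLearning': 'T',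
--     'Art': 'C', 'Design': 'C', 'Music': 'C', 'WeAreTheMusicMakers': 'C', 'streetwear': 'C',
--     'fitness': 'L', 'wellness': 'L', 'meditation': 'L', 'nutrition': 'L',
-- }
--
-- def categorize_by_cultural_context(topic, subreddit_distribution):
--     """Enhanced categorization based on subreddit context (single pass over the distribution)"""
--     tech_count = creative_count = lifestyle_count = 0
--     for sub, count in subreddit_distribution.items():
--         cat = _CATEGORY_INDEX.get(sub)
--         if cat == 'T':
--             tech_count += count
--         elif cat == 'C':
--             creative_count += count
--         elif cat == 'L':
--             lifestyle_count += count
--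
--     if tech_count > creative_count and tech_count > lifestyle_count:
--         return 'Technology'
--     elif creative_count > lifestyle_count:
--         return 'Creative'
--     elif lifestyle_count > 0:
--         return 'Lifestyle'
--     else:
--         return categorize_by_topic(topic)
-- ===== Notes on version B (the rewrite author's own statement) =====
-- stated objective: alternative
-- what changed: B builds an inverted subreddit->category index once and tallies all three category counts in a single pass over the distribution, instead of A's three separate dict.get scans over the constant category lists; the final comparison cascade is unchanged.
import Mathlib
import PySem

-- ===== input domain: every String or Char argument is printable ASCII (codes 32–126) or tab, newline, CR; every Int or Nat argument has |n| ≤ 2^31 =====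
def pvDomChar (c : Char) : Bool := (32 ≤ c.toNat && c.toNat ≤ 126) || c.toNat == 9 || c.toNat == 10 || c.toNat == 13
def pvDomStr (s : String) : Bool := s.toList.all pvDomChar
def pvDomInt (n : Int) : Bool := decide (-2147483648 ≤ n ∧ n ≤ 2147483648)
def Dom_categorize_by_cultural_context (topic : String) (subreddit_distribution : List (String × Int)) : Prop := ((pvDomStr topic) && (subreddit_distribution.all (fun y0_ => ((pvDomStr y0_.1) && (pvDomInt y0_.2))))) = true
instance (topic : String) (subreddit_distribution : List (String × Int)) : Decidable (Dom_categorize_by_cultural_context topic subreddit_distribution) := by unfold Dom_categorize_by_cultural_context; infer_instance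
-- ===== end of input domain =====

-- B replaces A's three repeated scans over the distribution by one pass driven by a
-- prebuilt subreddit→category index (objective: alternative decomposition, same cost on these tiny lists).

-- shared module helper (used as the fallback by both A and B, exactly as in the Python module)
def categorize_by_topic (topic : String) : String :=
  let topic_lower := PySem.Str.lower topic
  if (["ai", "crypto", "tech", "digital", "virtual"].any (fun term => PySem.Str.isIn term topic_lower)) then
    "Technology"
  else if (["fashion", "music", "art", "design", "creative"].any (fun term => PySem.Str.isIn term topic_lower)) then
    "Creative"
  else if (["health", "fitness", "wellness", "mental", "nutrition"].any (fun term => PySem.Str.isIn term topic_lower)) then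
    "Lifestyle"
  else if (["climate", "environment", "sustainability", "green"].any (fun term => PySem.Str.isIn term topic_lower)) then
    "Environmental"
  else if (["work", "career", "business", "productivity"].any (fun term => PySem.Str.isIn term topic_lower)) then
    "Professional"
  else if (["travel", "culture", "social", "community"].any (fun term => PySem.Str.isIn term topic_lower)) then
    "Social"
  else
    "Cultural"

-- ===== PORT A =====
def categorize_by_cultural_context (topic : String) (subreddit_distribution : List (String × Int)) : String :=
  let tech_subs : List String := ["technology", "futurology", "artificial", "MachineLearning"]
  let creative_subs : List String := ["Art", "Design", "Music", "WeAreTheMusicMakers", "streetwear"]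
  let lifestyle_subs : List String := ["fitness", "wellness", "meditation", "nutrition"]
  -- subreddit_distribution.get(sub, 0): first match in the association list, default 0
  let tech_count := (tech_subs.map (fun sub => (List.lookup sub subreddit_distribution).getD 0)).sum
  let creative_count := (creative_subs.map (fun sub => (List.lookup sub subreddit_distribution).getD 0)).sum
  let lifestyle_count := (lifestyle_subs.map (fun sub => (List.lookup sub subreddit_distribution).getD 0)).sum
  if tech_count > creative_count ∧ tech_count > lifestyle_count then
    "Technology"
  else if creative_count > lifestyle_count then
    "Creative"
  else if lifestyle_count > 0 then
    "Lifestyle"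
  else
    categorize_by_topic topic

-- ===== PORT B =====
def pvCategoryIndex : List (String × String) :=
  [("technology", "T"), ("futurology", "T"), ("artificial", "T"), ("MachineLearning", "T"),
   ("Art", "C"), ("Design", "C"), ("Music", "C"), ("WeAreTheMusicMakers", "C"), ("streetwear", "C"),
   ("fitness", "L"), ("wellness", "L"), ("meditation", "L"), ("nutrition", "L")]

def categorize_by_cultural_context_alt (topic : String) (subreddit_distribution : List (String × Int)) : String :=
  let counts := subreddit_distribution.foldl
    (fun (acc : Int × Int × Int) p =>
      let cat := List.lookup p.1 pvCategoryIndex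
      if cat = some "T" then (acc.1 + p.2, acc.2.1, acc.2.2)
      else if cat = some "C" then (acc.1, acc.2.1 + p.2, acc.2.2)
      else if cat = some "L" then (acc.1, acc.2.1, acc.2.2 + p.2)
      else acc)
    ((0 : Int), (0 : Int), (0 : Int))
  if counts.1 > counts.2.1 ∧ counts.1 > counts.2.2 then
    "Technology"
  else if counts.2.1 > counts.2.2 then
    "Creative"
  else if counts.2.2 > 0 then
    "Lifestyle"
  else
    categorize_by_topic topic

-- ===== PRECONDITION & SPEC =====
-- Pre_ excludes association lists with a duplicated subreddit key: such a list cannot arise from the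
-- Python dict both versions receive (A's dict.get reads the first binding, B's single pass adds all of them).
def Pre_categorize_by_cultural_context (topic : String) (subreddit_distribution : List (String × Int)) : Prop :=
  (subreddit_distribution.map Prod.fst).Nodup
instance (topic : String) (subreddit_distribution : List (String × Int)) : Decidable (Pre_categorize_by_cultural_context topic subreddit_distribution) := by unfold Pre_categorize_by_cultural_context; infer_instance

def pvWitness_categorize_by_cultural_context : String × (List (String × Int)) :=
  ("ai news", [("technology", 3), ("Art", 1)])

def Spec_categorize_by_cultural_context (topic : String) (subreddit_distribution : List (String × Int)) (out : String) : Prop := out = categorize_by_cultural_context_alt topic subreddit_distribution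
instance (topic : String) (subreddit_distribution : List (String × Int)) (out : String) : Decidable (Spec_categorize_by_cultural_context topic subreddit_distribution out) := by unfold Spec_categorize_by_cultural_context; infer_instance

-- ===== CLAIM (what is proved, stated in full; the proofs are below) =====
def Claim_equal_categorize_by_cultural_context : Prop := ∀ (topic : String) (subreddit_distribution : List (String × Int)), Dom_categorize_by_cultural_context topic subreddit_distribution → Pre_categorize_by_cultural_context topic subreddit_distribution → Spec_categorize_by_cultural_context topic subreddit_distribution (categorize_by_cultural_context topic subreddit_distribution)

-- ===== LEMMAS AND PROOFS =====

-- summing a point-update over a duplicate-free list of keys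
theorem pv_sum_map_ite (k : String) (v : Int) (h : String → Int) :
    ∀ (subs : List String), subs.Nodup →
      (subs.map (fun s => if s = k then v else h s)).sum
        = (subs.map h).sum + (if k ∈ subs then v - h k else 0) := by
  intro subs
  induction subs with
  | nil => simp
  | cons s tl ih =>
    intro hnd
    rcases List.nodup_cons.mp hnd with ⟨hs, htl⟩
    by_cases hks : k = s
    · subst hks
      have : tl.map (fun s => if s = k then v else h s) = tl.map h := by
        apply List.map_congr_left
        intro x hx
        have : x ≠ k := fun h' => hs (h' ▸ hx)
        simp [this]
      simp [this]
      ring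
    · have hmem : (k ∈ s :: tl) ↔ (k ∈ tl) := by
        simp [List.mem_cons, hks]
      simp only [List.map_cons, List.sum_cons, if_neg (fun h' => hks (Eq.symm h')), ih htl, hmem]
      ring

theorem pv_lookup_eq_none {k : String} {d : List (String × Int)}
    (h : k ∉ d.map Prod.fst) : List.lookup k d = none := by
  induction d with
  | nil => rfl
  | cons p tl ih =>
    simp only [List.map_cons, List.mem_cons] at h
    push_neg at h
    have hb : (k == p.1) = false := beq_eq_false_iff_ne.mpr h.1
    simp [List.lookup, hb, ih h.2]

-- A's repeated dict.get sum equals a filtered sum over the distribution, when keys are duplicate-free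
theorem pv_lookup_sum (subs : List String) (hs : subs.Nodup) :
    ∀ (d : List (String × Int)), (d.map Prod.fst).Nodup →
      (subs.map (fun s => (List.lookup s d).getD 0)).sum
        = (d.map (fun p => if p.1 ∈ subs then p.2 else 0)).sum := by
  intro d
  induction d with
  | nil => simp
  | cons p tl ih =>
    intro hnd
    rcases List.nodup_cons.mp hnd with ⟨hp, htl⟩
    have hstep : (subs.map (fun s => (List.lookup s ((p.1, p.2) :: tl)).getD 0))
        = subs.map (fun s => if s = p.1 then p.2 else (List.lookup s tl).getD 0) := by
      apply List.map_congr_left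
      intro x _
      by_cases hx : x = p.1
      · have hb : (x == p.1) = true := beq_iff_eq.mpr hx
        simp [List.lookup, hb, hx]
      · have hb : (x == p.1) = false := beq_eq_false_iff_ne.mpr hx
        simp [List.lookup, hb, hx]
    have hk0 : (List.lookup p.1 tl).getD 0 = 0 := by
      rw [pv_lookup_eq_none hp]; rfl
    calc (subs.map (fun s => (List.lookup s ((p.1, p.2) :: tl)).getD 0)).sum
        = (subs.map (fun s => if s = p.1 then p.2 else (List.lookup s tl).getD 0)).sum := by
          rw [hstep]
      _ = (subs.map (fun s => (List.lookup s tl).getD 0)).sum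
            + (if p.1 ∈ subs then p.2 - (List.lookup p.1 tl).getD 0 else 0) := by
          rw [pv_sum_map_ite p.1 p.2 _ subs hs]
      _ = (tl.map (fun q => if q.1 ∈ subs then q.2 else 0)).sum
            + (if p.1 ∈ subs then p.2 else 0) := by
          rw [ih htl, hk0]
          by_cases hmem : p.1 ∈ subs <;> simp [hmem]
      _ = (((p.1, p.2) :: tl).map (fun q => if q.1 ∈ subs then q.2 else 0)).sum := by
          simp [List.map_cons, List.sum_cons]; ring

-- the index lookup, characterised by the three constant category lists
theorem pv_index_lookup (k : String) :
    List.lookup k pvCategoryIndex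
      = if k ∈ ["technology", "futurology", "artificial", "MachineLearning"] then some "T"
        else if k ∈ ["Art", "Design", "Music", "WeAreTheMusicMakers", "streetwear"] then some "C"
        else if k ∈ ["fitness", "wellness", "meditation", "nutrition"] then some "L"
        else none := by
  by_cases h1 : k = "technology"; · subst h1; decide
  by_cases h2 : k = "futurology"; · subst h2; decide
  by_cases h3 : k = "artificial"; · subst h3; decide
  by_cases h4 : k = "MachineLearning"; · subst h4; decide
  by_cases h5 : k = "Art"; · subst h5; decide
  by_cases h6 : k = "Design"; · subst h6; decide
  by_cases h7 : k = "Music"; · subst h7; decide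
  by_cases h8 : k = "WeAreTheMusicMakers"; · subst h8; decide
  by_cases h9 : k = "streetwear"; · subst h9; decide
  by_cases h10 : k = "fitness"; · subst h10; decide
  by_cases h11 : k = "wellness"; · subst h11; decide
  by_cases h12 : k = "meditation"; · subst h12; decide
  by_cases h13 : k = "nutrition"; · subst h13; decide
  have g1 : (k == "technology") = false := beq_eq_false_iff_ne.mpr h1
  have g2 : (k == "futurology") = false := beq_eq_false_iff_ne.mpr h2
  have g3 : (k == "artificial") = false := beq_eq_false_iff_ne.mpr h3
  have g4 : (k == "MachineLearning") = false := beq_eq_false_iff_ne.mpr h4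
  have g5 : (k == "Art") = false := beq_eq_false_iff_ne.mpr h5
  have g6 : (k == "Design") = false := beq_eq_false_iff_ne.mpr h6
  have g7 : (k == "Music") = false := beq_eq_false_iff_ne.mpr h7
  have g8 : (k == "WeAreTheMusicMakers") = false := beq_eq_false_iff_ne.mpr h8
  have g9 : (k == "streetwear") = false := beq_eq_false_iff_ne.mpr h9
  have g10 : (k == "fitness") = false := beq_eq_false_iff_ne.mpr h10
  have g11 : (k == "wellness") = false := beq_eq_false_iff_ne.mpr h11
  have g12 : (k == "meditation") = false := beq_eq_false_iff_ne.mpr h12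
  have g13 : (k == "nutrition") = false := beq_eq_false_iff_ne.mpr h13
  simp [pvCategoryIndex, List.lookup, List.mem_cons,
        g1, g2, g3, g4, g5, g6, g7, g8, g9, g10, g11, g12, g13,
        h1, h2, h3, h4, h5, h6, h7, h8, h9, h10, h11, h12, h13]

-- B's single fold computes the three filtered sums at once
theorem pv_tally_eq :
    ∀ (d : List (String × Int)) (t c l : Int),
      d.foldl
        (fun (acc : Int × Int × Int) p =>
          let cat := List.lookup p.1 pvCategoryIndex
          if cat = some "T" then (acc.1 + p.2, acc.2.1, acc.2.2)
          else if cat = some "C" then (acc.1, acc.2.1 + p.2, acc.2.2)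
          else if cat = some "L" then (acc.1, acc.2.1, acc.2.2 + p.2)
          else acc)
        (t, c, l)
      = (t + (d.map (fun p => if p.1 ∈ ["technology", "futurology", "artificial", "MachineLearning"] then p.2 else 0)).sum,
         c + (d.map (fun p => if p.1 ∈ ["Art", "Design", "Music", "WeAreTheMusicMakers", "streetwear"] then p.2 else 0)).sum,
         l + (d.map (fun p => if p.1 ∈ ["fitness", "wellness", "meditation", "nutrition"] then p.2 else 0)).sum) := by
  intro d
  induction d with
  | nil => intro t c l; simp
  | cons p tl ih =>
    intro t c l
    rw [List.foldl_cons]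
    simp only [pv_index_lookup p.1]
    by_cases hT : p.1 ∈ ["technology", "futurology", "artificial", "MachineLearning"]
    · have hT' := hT
      simp only [List.mem_cons, List.not_mem_nil, or_false] at hT'
      have hC : p.1 ∉ ["Art", "Design", "Music", "WeAreTheMusicMakers", "streetwear"] := by
        rcases hT' with h | h | h | h <;> rw [h] <;> decide
      have hL : p.1 ∉ ["fitness", "wellness", "meditation", "nutrition"] := by
        rcases hT' with h | h | h | h <;> rw [h] <;> decide
      simp only [List.mem_cons, List.not_mem_nil, or_false, not_or] at hC hL
      simp [hT, hC, hL, ih, Prod.mk.injEq]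
      rw [if_pos hT']
      omega
    by_cases hC : p.1 ∈ ["Art", "Design", "Music", "WeAreTheMusicMakers", "streetwear"]
    · have hC' := hC
      simp only [List.mem_cons, List.not_mem_nil, or_false] at hC'
      have hL : p.1 ∉ ["fitness", "wellness", "meditation", "nutrition"] := by
        rcases hC' with h | h | h | h | h <;> rw [h] <;> decide
      simp only [List.mem_cons, List.not_mem_nil, or_false, not_or] at hT hL
      simp [hT, hC, hL, ih, Prod.mk.injEq]
      rw [if_pos hC']
      omega
    by_cases hL : p.1 ∈ ["fitness", "wellness", "meditation", "nutrition"]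
    · have hL' := hL
      simp only [List.mem_cons, List.not_mem_nil, or_false] at hL'
      simp only [List.mem_cons, List.not_mem_nil, or_false, not_or] at hT hC
      simp [hT, hC, hL, ih, Prod.mk.injEq]
      rw [if_pos hL']
      omega
    · simp only [List.mem_cons, List.not_mem_nil, or_false, not_or] at hT hC hL
      simp [hT, hC, hL, ih]

-- ===== VERDICT (by name: the statement is the Claim_ definition above) =====
theorem categorize_by_cultural_context_spec : Claim_equal_categorize_by_cultural_context := by
  intro topic d _hdom hpre
  unfold Spec_categorize_by_cultural_context
  unfold categorize_by_cultural_context categorize_by_cultural_context_alt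
  simp only []
  rw [pv_tally_eq d 0 0 0,
      pv_lookup_sum ["technology", "futurology", "artificial", "MachineLearning"] (by decide) d hpre,
      pv_lookup_sum ["Art", "Design", "Music", "WeAreTheMusicMakers", "streetwear"] (by decide) d hpre,
      pv_lookup_sum ["fitness", "wellness", "meditation", "nutrition"] (by decide) d hpre]
  simp
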